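-- pv_equiv track=rewrite | github.com/subhLLM/aiimsllm | main21.py | clean_extracted_entities
-- ===== SOURCE A (Python) =====
-- def clean_extracted_entities(entities):
--     """
--     Cleans broken or subword tokens from entity lists like doctors/persons/etc.
--     - Removes '##' prefixes (BERT-style subwords)
--     - Joins fragments into full names
--     - Deduplicates
--     """
--     from itertools import groupby
--
--     def is_junk(token):
--         return token.startswith("##") or len(token) <= 1 or not token[0].isalpha()
--
--     cleaned_entities = {}
--     for key, values in entities.items():
--         new_vals = []
--         current_phrase = []
--
--         for token in values:
--             token = token.replace("##", "").strip()
--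
--             if is_junk(token):
--                 continue
--
--             # Group tokens into name phrases (e.g., ['Shruti', 'Sharma'])
--             if token.istitle() or token[0].isupper():
--                 if current_phrase:
--                     new_vals.append(" ".join(current_phrase))
--                 current_phrase = [token]
--             else:
--                 current_phrase.append(token)
--
--         if current_phrase:
--             new_vals.append(" ".join(current_phrase))
--
--         cleaned_entities[key] = sorted(set([x.strip() for x in new_vals if x.strip()]))
--
--     return cleaned_entities
-- ===== SOURCE B (Python) =====
-- def clean_extracted_entities(entities):
--     """Same cleaning, but as a pipeline: filter/clean tokens, tag each token
--     with a phrase-group id (incremented at each title/upper-initial token),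
--     then groupby the ids to form phrases, then dedup+sort."""
--     from itertools import groupby
--
--     def clean(token):
--         return token.replace("##", "").strip()
--
--     def keep(token):
--         return not (token.startswith("##") or len(token) <= 1
--                     or not token[0].isalpha())
--
--     def starts_phrase(token):
--         return token.istitle() or token[0].isupper()
--
--     result = {}
--     for key, values in entities.items():
--         cleaned = [t for t in map(clean, values) if keep(t)]
--         gid = 0
--         tagged = []
--         for t in cleaned:
--             if starts_phrase(t):
--                 gid += 1
--             tagged.append((gid, t))
--         phrases = [" ".join(t for _, t in grp)
--                    for _, grp in groupby(tagged, key=lambda p: p[0])]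
--         result[key] = sorted(set(x.strip() for x in phrases if x.strip()))
--     return result
-- ===== Notes on version B (the rewrite author's own statement) =====
-- stated objective: alternative
-- what changed: Replaces A's single stateful loop (accumulating a current phrase and flushing it at each title/upper-initial token, plus a trailing flush) with a three-stage pipeline per key: clean+filter the tokens, tag each with a phrase-group id incremented at each phrase-starting token, then itertools.groupby the ids to join each run into a phrase; dedup+sort is unchanged.
import Mathlib
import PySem

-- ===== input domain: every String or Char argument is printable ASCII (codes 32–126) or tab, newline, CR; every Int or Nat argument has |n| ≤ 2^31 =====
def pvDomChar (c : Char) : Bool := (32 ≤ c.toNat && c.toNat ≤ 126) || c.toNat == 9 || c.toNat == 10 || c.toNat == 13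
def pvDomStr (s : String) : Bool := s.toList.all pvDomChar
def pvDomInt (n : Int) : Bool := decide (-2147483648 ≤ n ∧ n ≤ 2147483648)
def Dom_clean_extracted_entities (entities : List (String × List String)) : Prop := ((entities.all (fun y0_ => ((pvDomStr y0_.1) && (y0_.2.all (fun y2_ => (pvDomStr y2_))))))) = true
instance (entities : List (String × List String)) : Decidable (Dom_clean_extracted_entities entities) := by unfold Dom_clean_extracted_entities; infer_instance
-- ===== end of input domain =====

-- B re-segments via a group-id tagging + consecutive grouping pipeline (filter/clean, tag, chunk)
-- instead of A's single stateful phrase-accumulator loop; objective: alternative decomposition, same cost.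


-- hand-written port of str.istitle() (not in PySem), exact on ASCII: cased chars are A-Z/a-z,
-- an upper char must not follow a cased char, a lower char must follow one, and ≥1 cased char.
def pvIstitleGo (prevCased found : Bool) : List Char → Bool
  | [] => found
  | c :: rest =>
    if PySem.Chars.isupper c then (if prevCased then false else pvIstitleGo true true rest)
    else if PySem.Chars.islower c then (if prevCased then pvIstitleGo true true rest else false)
    else pvIstitleGo false found rest

def pvIstitle (s : String) : Bool := pvIstitleGo false false s.toList

-- ===== PORT A =====
def pvAIsJunk (t : String) : Bool :=
  PySem.Str.startswith t "##" || decide (PySem.Str.len t ≤ 1) ||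
    !(match t.toList with | c :: _ => PySem.Chars.isalpha c | [] => false)

def pvACap (t : String) : Bool :=
  pvIstitle t || (match t.toList with | c :: _ => PySem.Chars.isupper c | [] => false)

def pvAStep (st : List String × List String) (tok : String) : List String × List String :=
  let t := PySem.Str.strip (PySem.Str.replace tok "##" "")
  if pvAIsJunk t then st
  else if pvACap t then
    ((if st.2.isEmpty then st.1 else st.1 ++ [PySem.Str.join " " st.2]), [t])
  else (st.1, st.2 ++ [t])

-- the trailing 'if current_phrase: new_vals.append(...)' flush
def pvANewVals (st : List String × List String) : List String :=
  if st.2.isEmpty then st.1 else st.1 ++ [PySem.Str.join " " st.2]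

def pvAProcess (values : List String) : List String :=
  PySem.List.sorted
    (PySem.Set.ofList ((pvANewVals (values.foldl pvAStep ([], []))).filterMap (fun x =>
      if PySem.Str.strip x = "" then none else some (PySem.Str.strip x))))
    (fun x => x) false

def clean_extracted_entities (entities : List (String × List String)) : List (String × List String) :=
  (entities.foldl (fun d kv => PySem.Dict.insert d kv.1 (pvAProcess kv.2)) PySem.Dict.empty).items

-- ===== PORT B =====
def pvBClean (tok : String) : String := PySem.Str.strip (PySem.Str.replace tok "##" "")

def pvBKeep (t : String) : Bool :=
  !(PySem.Str.startswith t "##" || decide (PySem.Str.len t ≤ 1) ||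
    !(match t.toList with | c :: _ => PySem.Chars.isalpha c | [] => false))

def pvBStarts (t : String) : Bool :=
  pvIstitle t || (match t.toList with | c :: _ => PySem.Chars.isupper c | [] => false)

-- tag each cleaned token with its phrase-group id (id increments at a phrase-starting token)
def pvBTag (cleaned : List String) : List (Nat × String) :=
  (cleaned.foldl (fun (st : Nat × List (Nat × String)) t =>
      let g := if pvBStarts t then st.1 + 1 else st.1
      (g, st.2 ++ [(g, t)])) (0, [])).2

-- itertools.groupby on the group ids: maximal runs of equal first components
def pvBChunkAux (i : Nat) (cur : List String) : List (Nat × String) → List (List String)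
  | [] => [cur]
  | (j, t) :: rest => if j = i then pvBChunkAux i (cur ++ [t]) rest else cur :: pvBChunkAux j [t] rest

def pvBChunk : List (Nat × String) → List (List String)
  | [] => []
  | (i, t) :: rest => pvBChunkAux i [t] rest

def pvBPhrases (values : List String) : List String :=
  (pvBChunk (pvBTag ((values.map pvBClean).filter pvBKeep))).map (fun g => PySem.Str.join " " g)

def pvBProcess (values : List String) : List String :=
  PySem.List.sorted
    (PySem.Set.ofList ((pvBPhrases values).filterMap (fun x =>
      if PySem.Str.strip x = "" then none else some (PySem.Str.strip x))))
    (fun x => x) false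

def clean_extracted_entities_alt (entities : List (String × List String)) : List (String × List String) :=
  (entities.foldl (fun d kv => PySem.Dict.insert d kv.1 (pvBProcess kv.2)) PySem.Dict.empty).items

-- ===== PRECONDITION & SPEC =====
def Spec_clean_extracted_entities (entities : List (String × List String)) (out : List (String × List String)) : Prop := out = clean_extracted_entities_alt entities
instance (entities : List (String × List String)) (out : List (String × List String)) : Decidable (Spec_clean_extracted_entities entities out) := by unfold Spec_clean_extracted_entities; infer_instance

-- ===== CLAIM (what is proved, stated in full; the proofs are below) =====
def Claim_equal_clean_extracted_entities : Prop := ∀ (entities : List (String × List String)), Dom_clean_extracted_entities entities → Spec_clean_extracted_entities entities (clean_extracted_entities entities)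

-- ===== LEMMAS AND PROOFS =====

-- common reference segmentation of a cleaned token list into phrases
def pvSegAux (cur : List String) : List String → List String
  | [] => [PySem.Str.join " " cur]
  | t :: rest =>
    if pvACap t then PySem.Str.join " " cur :: pvSegAux [t] rest else pvSegAux (cur ++ [t]) rest

def pvSeg : List String → List String
  | [] => []
  | t :: rest => pvSegAux [t] rest

-- A's step on the already-cleaned, kept token (no cleaning, no junk test)
def pvStepK (st : List String × List String) (t : String) : List String × List String :=
  if pvACap t then
    ((if st.2.isEmpty then st.1 else st.1 ++ [PySem.Str.join " " st.2]), [t])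
  else (st.1, st.2 ++ [t])

theorem pvBKeep_eq (t : String) : pvBKeep t = !pvAIsJunk t := rfl
theorem pvBStarts_eq (t : String) : pvBStarts t = pvACap t := rfl

theorem pvAStep_eq (st : List String × List String) (v : String) :
    pvAStep st v = if pvAIsJunk (PySem.Str.strip (PySem.Str.replace v "##" "")) then st
      else pvStepK st (PySem.Str.strip (PySem.Str.replace v "##" "")) := by
  unfold pvAStep pvStepK
  cases h : pvAIsJunk (PySem.Str.strip (PySem.Str.replace v "##" ""))
  · simp only [h, Bool.false_eq_true, if_false]
  · simp only [h, if_pos]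

theorem foldl_stepA_eq (values : List String) (st : List String × List String) :
    values.foldl pvAStep st = ((values.map pvBClean).filter pvBKeep).foldl pvStepK st := by
  induction values generalizing st with
  | nil => simp [List.foldl_nil, List.map_nil, List.filter_nil]
  | cons v rest ih =>
    rw [List.foldl_cons]
    rw [pvAStep_eq]
    rw [List.map_cons]
    rw [List.filter_cons]
    rw [pvBKeep_eq]
    have hb : pvBClean v = PySem.Str.strip (PySem.Str.replace v "##" "") := rfl
    rw [hb]
    cases h : pvAIsJunk (PySem.Str.strip (PySem.Str.replace v "##" ""))
    · simp only [Bool.false_eq_true, if_false, Bool.not_false, if_pos, List.foldl_cons]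
      exact ih _
    · simp only [if_pos, Bool.not_true, Bool.false_eq_true, if_false]
      exact ih _

theorem finish_foldl_ne (l : List String) (nv cur : List String) (h : cur ≠ []) :
    pvANewVals (l.foldl pvStepK (nv, cur)) = nv ++ pvSegAux cur l := by
  induction l generalizing nv cur with
  | nil => simp [pvANewVals, pvSegAux, h]
  | cons t rest ih =>
    by_cases hc : pvACap t = true
    · have hs : pvStepK (nv, cur) t = (nv ++ [PySem.Str.join " " cur], [t]) := by
        simp [pvStepK, hc, h]
      rw [List.foldl_cons, hs, ih _ _ (by simp)]
      simp [pvSegAux, hc]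
    · have hs : pvStepK (nv, cur) t = (nv, cur ++ [t]) := by
        simp [pvStepK, hc]
      rw [List.foldl_cons, hs, ih _ _ (by simp [h])]
      simp [pvSegAux, hc]

theorem finish_foldl (l : List String) :
    pvANewVals (l.foldl pvStepK ([], [])) = pvSeg l := by
  cases l with
  | nil => simp [pvANewVals, pvSeg]
  | cons t rest =>
    have hs : pvStepK ([], []) t = ([], [t]) := by
      by_cases hc : pvACap t = true <;> simp [pvStepK, hc]
    rw [List.foldl_cons, hs, finish_foldl_ne rest [] [t] (by simp)]
    rfl

-- B side: the tag fold produces this direct recursion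
def pvTagFrom (c : Nat) : List String → List (Nat × String)
  | [] => []
  | t :: rest => let g := if pvBStarts t then c + 1 else c; (g, t) :: pvTagFrom g rest

theorem tag_foldl (l : List String) (c : Nat) (acc : List (Nat × String)) :
    (l.foldl (fun (st : Nat × List (Nat × String)) t =>
        let g := if pvBStarts t then st.1 + 1 else st.1
        (g, st.2 ++ [(g, t)])) (c, acc)).2 = acc ++ pvTagFrom c l := by
  induction l generalizing c acc with
  | nil => simp [pvTagFrom]
  | cons t rest ih =>
    by_cases hc : pvBStarts t = true <;>
      simp [pvTagFrom, hc, List.foldl_cons, ih]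

theorem chunkAux_tagFrom (l : List String) (c : Nat) (cur : List String) :
    (pvBChunkAux c cur (pvTagFrom c l)).map (fun g => PySem.Str.join " " g) = pvSegAux cur l := by
  induction l generalizing c cur with
  | nil => simp [pvTagFrom, pvBChunkAux, pvSegAux]
  | cons t rest ih =>
    by_cases hc : pvBStarts t = true
    · have hc' : pvACap t = true := by rw [← pvBStarts_eq]; exact hc
      simp only [pvTagFrom, hc, if_pos, pvBChunkAux,
        if_neg (by omega : ¬ c + 1 = c), List.map_cons, ih]
      simp [pvSegAux, hc']
    · have hc' : pvACap t = false := by rw [← pvBStarts_eq]; simpa using hc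
      simp only [pvTagFrom, hc, if_false, Bool.false_eq_true, pvBChunkAux, pvSegAux, hc']
      exact ih c (cur ++ [t])

theorem chunk_tag (l : List String) :
    (pvBChunk (pvBTag l)).map (fun g => PySem.Str.join " " g) = pvSeg l := by
  have htag : pvBTag l = pvTagFrom 0 l := by
    simp [pvBTag, tag_foldl l 0 []]
  rw [htag]
  cases l with
  | nil => rfl
  | cons t rest =>
    show (pvBChunkAux _ [t] (pvTagFrom _ rest)).map (fun g => PySem.Str.join " " g) = pvSegAux [t] rest
    exact chunkAux_tagFrom rest _ [t]

theorem process_eq (values : List String) : pvAProcess values = pvBProcess values := by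
  unfold pvAProcess pvBProcess pvBPhrases
  rw [foldl_stepA_eq values ([], []), finish_foldl, chunk_tag]

theorem foldl_dict_eq (entities : List (String × List String))
    (d : PySem.Dict String (List String)) :
    entities.foldl (fun d kv => PySem.Dict.insert d kv.1 (pvAProcess kv.2)) d =
      entities.foldl (fun d kv => PySem.Dict.insert d kv.1 (pvBProcess kv.2)) d := by
  induction entities generalizing d with
  | nil => rfl
  | cons kv rest ih =>
    rw [List.foldl_cons, List.foldl_cons, process_eq, ih]

-- ===== VERDICT (by name: the statement is the Claim_ definition above) =====
theorem clean_extracted_entities_spec : Claim_equal_clean_extracted_entities := by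
  intro entities _
  unfold Spec_clean_extracted_entities clean_extracted_entities clean_extracted_entities_alt
  rw [foldl_dict_eq]
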